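-- pv_equiv track=rewrite | github.com/angishen/algorithms-datastructures | ch10_heaps.py | k_ascending_descending
-- ===== SOURCE A (Python) =====
-- import heapq
--
-- def k_ascending_descending(arr, k):
-- 	def split_arr_kszie_chunks(arr, k):
-- 		for i in range(0, len(arr), k):
-- 			yield arr[i:i+k]
--
-- 	result = []
-- 	min_heap, max_heap = [], []
-- 	arrays = list(split_arr_kszie_chunks(arr, k))
--
-- 	for i in range(len(arrays)):
-- 		for j in range(len(arrays[i])):
-- 			if i % 2 == 0:
-- 				heapq.heappush(min_heap, arrays[i][j])
-- 			else:
-- 				heapq.heappush(max_heap, -arrays[i][j])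
-- 		if i % 2 == 0:
-- 			while min_heap:
-- 				result.append(heapq.heappop(min_heap))
-- 		else:
-- 			while max_heap:
-- 				result.append(-heapq.heappop(max_heap))
--
-- 	return result
-- ===== SOURCE B (Python) =====
-- def k_ascending_descending(arr, k):
--     chunks = [arr[i:i+k] for i in range(0, len(arr), k)]
--     result = []
--     for idx, chunk in enumerate(chunks):
--         result.extend(sorted(chunk, reverse=idx % 2 == 1))
--     return result
-- ===== Notes on version B (the rewrite author's own statement) =====
-- stated objective: simpler
-- what changed: Each chunk's heap machinery (element-by-element heappush then a drain loop of heappop, with negation for the max-heap) is replaced by a single sorted(chunk, reverse=idx % 2 == 1) call per chunk, dropping both heaps and all push/pop loops.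
import Mathlib
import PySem

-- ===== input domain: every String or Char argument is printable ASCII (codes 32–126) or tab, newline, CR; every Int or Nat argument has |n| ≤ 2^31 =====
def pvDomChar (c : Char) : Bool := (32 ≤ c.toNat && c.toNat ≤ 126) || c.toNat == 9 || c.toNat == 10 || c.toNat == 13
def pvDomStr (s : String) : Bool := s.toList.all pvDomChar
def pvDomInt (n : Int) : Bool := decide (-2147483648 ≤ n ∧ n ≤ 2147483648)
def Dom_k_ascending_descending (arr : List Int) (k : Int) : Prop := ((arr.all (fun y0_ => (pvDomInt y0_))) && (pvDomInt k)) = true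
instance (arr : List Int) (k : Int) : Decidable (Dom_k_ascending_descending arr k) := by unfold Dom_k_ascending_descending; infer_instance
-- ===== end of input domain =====

-- B replaces the per-chunk heap push/pop machinery by a direct sorted()/sorted(reverse=True)
-- call per chunk (objective: simpler).

-- ===== PORT A =====
-- heapq.heappush / heappop are stdlib calls; they are ported by their observable contract on
-- Int (heappop returns the current minimum): the heap list is kept sorted, heappush is an
-- ordered insert and heappop takes the head — exact for the push/pop sequence A performs.
def pvHeappush (heap : List Int) (x : Int) : List Int :=
  PySem.List.insertBy (fun a b => decide (a < b)) x heap

-- 'while min_heap: result.append(heapq.heappop(min_heap))'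
def pvDrainMin (res : List Int) (heap : List Int) : List Int :=
  match heap with
  | [] => res
  | h :: t => pvDrainMin (res ++ [h]) t

-- 'while max_heap: result.append(-heapq.heappop(max_heap))'
def pvDrainMax (res : List Int) (heap : List Int) : List Int :=
  match heap with
  | [] => res
  | h :: t => pvDrainMax (res ++ [-h]) t

-- body of 'for i in range(len(arrays))': state (result, min_heap, max_heap)
def pvStepA (st : List Int × List Int × List Int) (p : Int × List Int) : List Int × List Int × List Int :=
  let (res, mn, mx) := st
  let (i, chunk) := p
  -- for j in range(len(arrays[i])): push arrays[i][j] (or its negation)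
  let (mn, mx) := chunk.foldl
    (fun (hp : List Int × List Int) x =>
      if PySem.Int.mod i 2 = 0 then (pvHeappush hp.1 x, hp.2)
      else (hp.1, pvHeappush hp.2 (-x))) (mn, mx)
  if PySem.Int.mod i 2 = 0 then (pvDrainMin res mn, [], mx)
  else (pvDrainMax res mx, mn, [])

def k_ascending_descending (arr : List Int) (k : Int) : List Int :=
  let arrays := (PySem.List.pyRange 0 (PySem.List.len arr) k).map
    (fun i => PySem.List.slice arr (some i) (some (i + k)))
  ((PySem.List.enumerate arrays 0).foldl pvStepA ([], [], [])).1

-- ===== PORT B =====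
def k_ascending_descending_alt (arr : List Int) (k : Int) : List Int :=
  let chunks := (PySem.List.pyRange 0 (PySem.List.len arr) k).map
    (fun i => PySem.List.slice arr (some i) (some (i + k)))
  (PySem.List.enumerate chunks 0).foldl
    (fun result p =>
      result ++ PySem.List.sorted p.2 (fun x => x) (PySem.Int.mod p.1 2 == 1)) []

-- ===== PRECONDITION & SPEC =====
-- Pre_ excludes only k = 0, where Python's range(0, len(arr), 0) raises ValueError.
def Pre_k_ascending_descending (arr : List Int) (k : Int) : Prop := k ≠ 0
instance (arr : List Int) (k : Int) : Decidable (Pre_k_ascending_descending arr k) := by unfold Pre_k_ascending_descending; infer_instance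
def pvWitness_k_ascending_descending : List Int × Int := ([3, 1, 2, 5, 4], 2)
def Spec_k_ascending_descending (arr : List Int) (k : Int) (out : List Int) : Prop := out = k_ascending_descending_alt arr k
instance (arr : List Int) (k : Int) (out : List Int) : Decidable (Spec_k_ascending_descending arr k out) := by unfold Spec_k_ascending_descending; infer_instance

-- ===== CLAIM (what is proved, stated in full; the proofs are below) =====
def Claim_equal_k_ascending_descending : Prop := ∀ (arr : List Int) (k : Int), Dom_k_ascending_descending arr k → Pre_k_ascending_descending arr k → Spec_k_ascending_descending arr k (k_ascending_descending arr k)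

-- ===== LEMMAS AND PROOFS =====

-- draining the kept-sorted min-heap appends it as is
lemma pvDrainMin_eq (res heap : List Int) : pvDrainMin res heap = res ++ heap := by
  induction heap generalizing res with
  | nil => simp [pvDrainMin]
  | cons h t ih => simp [pvDrainMin, ih]

-- draining the max-heap appends the negations
lemma pvDrainMax_eq (res heap : List Int) : pvDrainMax res heap = res ++ heap.map (fun x => -x) := by
  induction heap generalizing res with
  | nil => simp [pvDrainMax]
  | cons h t ih => simp [pvDrainMax, ih]

-- folding pvHeappush from [] is Python's sorted()
lemma foldl_heappush_eq_sorted (l : List Int) :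
    l.foldl pvHeappush [] = PySem.List.sorted l (fun x => x) false := by
  rw [PySem.List.sorted_eq_foldl_insertBy]
  rfl

-- negate ∘ sorted ∘ negate is sorted(·, reverse=True) on Int
lemma map_neg_sorted_map_neg (l : List Int) :
    (PySem.List.sorted (l.map (fun x => -x)) (fun x => x) false).map (fun x => -x)
      = PySem.List.sorted l (fun x => x) true := by
  apply PySem.List.eq_of_perm_of_pairwise_le_of_injective (key := fun x : Int => -x)
    (fun a b h => by simpa using h)
  · have h1 : ((PySem.List.sorted (l.map (fun x => -x)) (fun x => x) false).map
        (fun x : Int => -x)).Perm ((l.map (fun x => -x)).map (fun x => -x)) :=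
      (PySem.List.sorted_perm _ _ _).map _
    have h2 : (l.map (fun x : Int => -x)).map (fun x : Int => -x) = l := by
      simp [List.map_map]
    rw [h2] at h1
    exact h1.trans (PySem.List.sorted_perm l (fun x => x) true).symm
  · rw [List.pairwise_map]
    exact (PySem.List.sorted_pairwise (l.map (fun x => -x)) (fun x => x)).imp
      (by intro a b hab; simpa using hab)
  · exact (PySem.List.sorted_pairwise_rev l (fun x => x)).imp
      (by intro a b hab; simpa using hab)

-- the inner push loop, specialised to the branch taken
lemma inner_fold_even (chunk : List Int) (i : Int) (h : PySem.Int.mod i 2 = 0)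
    (mn mx : List Int) :
    chunk.foldl
      (fun (hp : List Int × List Int) x =>
        if PySem.Int.mod i 2 = 0 then (pvHeappush hp.1 x, hp.2)
        else (hp.1, pvHeappush hp.2 (-x))) (mn, mx)
      = (chunk.foldl pvHeappush mn, mx) := by
  induction chunk generalizing mn with
  | nil => rfl
  | cons c t ih =>
    rw [List.foldl_cons, List.foldl_cons]
    show t.foldl _ (if PySem.Int.mod i 2 = 0 then (pvHeappush mn c, mx)
        else (mn, pvHeappush mx (-c))) = _
    rw [if_pos h, ih]

lemma inner_fold_odd (chunk : List Int) (i : Int) (h : ¬ PySem.Int.mod i 2 = 0)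
    (mn mx : List Int) :
    chunk.foldl
      (fun (hp : List Int × List Int) x =>
        if PySem.Int.mod i 2 = 0 then (pvHeappush hp.1 x, hp.2)
        else (hp.1, pvHeappush hp.2 (-x))) (mn, mx)
      = (mn, (chunk.map (fun x => -x)).foldl pvHeappush mx) := by
  induction chunk generalizing mx with
  | nil => rfl
  | cons c t ih =>
    rw [List.foldl_cons, List.map_cons, List.foldl_cons]
    show t.foldl _ (if PySem.Int.mod i 2 = 0 then (pvHeappush mn c, mx)
        else (mn, pvHeappush mx (-c))) = _
    rw [if_neg h, ih]

-- one step of A with both heaps empty, per parity of the chunk index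
lemma stepA_even (res c : List Int) (i : Int) (h : PySem.Int.mod i 2 = 0) :
    pvStepA (res, [], []) (i, c)
      = (res ++ PySem.List.sorted c (fun x => x) false, [], []) := by
  show (let (mn, mx) := c.foldl _ (([] : List Int), ([] : List Int));
        if PySem.Int.mod i 2 = 0 then (pvDrainMin res mn, [], mx)
        else (pvDrainMax res mx, mn, [])) = _
  rw [inner_fold_even c i h]
  dsimp only
  rw [if_pos h, pvDrainMin_eq, foldl_heappush_eq_sorted]

lemma stepA_odd (res c : List Int) (i : Int) (h : ¬ PySem.Int.mod i 2 = 0) :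
    pvStepA (res, [], []) (i, c)
      = (res ++ PySem.List.sorted c (fun x => x) true, [], []) := by
  show (let (mn, mx) := c.foldl _ (([] : List Int), ([] : List Int));
        if PySem.Int.mod i 2 = 0 then (pvDrainMin res mn, [], mx)
        else (pvDrainMax res mx, mn, [])) = _
  rw [inner_fold_odd c i h]
  dsimp only
  rw [if_neg h, pvDrainMax_eq, foldl_heappush_eq_sorted,
    map_neg_sorted_map_neg]

-- main loop invariant: with both heaps empty at a chunk boundary, A's fold produces B's fold
lemma loop_eq (chunks : List (List Int)) (i : Int) (res : List Int) :
    ((PySem.List.enumerate chunks i).foldl pvStepA (res, [], [])).1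
      = (PySem.List.enumerate chunks i).foldl
          (fun result p =>
            result ++ PySem.List.sorted p.2 (fun x => x) (PySem.Int.mod p.1 2 == 1)) res := by
  induction chunks generalizing i res with
  | nil => simp [PySem.List.enumerate_nil]
  | cons c t ih =>
    rw [PySem.List.enumerate_cons, List.foldl_cons, List.foldl_cons]
    rcases PySem.Int.mod_two_eq i with h | h
    · have hb : (PySem.Int.mod i 2 == 1) = false := by rw [h]; rfl
      rw [stepA_even res c i h, ih]
      show _ = List.foldl _ (res ++ PySem.List.sorted c (fun x => x)
        (PySem.Int.mod i 2 == 1)) _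
      rw [hb]
    · have hb : (PySem.Int.mod i 2 == 1) = true := by rw [h]; rfl
      rw [stepA_odd res c i (by rw [h]; decide), ih]
      show _ = List.foldl _ (res ++ PySem.List.sorted c (fun x => x)
        (PySem.Int.mod i 2 == 1)) _
      rw [hb]

-- ===== VERDICT (by name: the statement is the Claim_ definition above) =====
theorem k_ascending_descending_spec : Claim_equal_k_ascending_descending := by
  intro arr k _ _
  unfold Spec_k_ascending_descending k_ascending_descending k_ascending_descending_alt
  exact loop_eq _ 0 []
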